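-- pv_equiv track=rewrite | github.com/Toralis-Labs/Aortic-Dynamics-Model | oldcodes/sizingnew.py | canonical_semantic_label
-- ===== SOURCE A (Python) =====
-- from typing import TYPE_CHECKING, Dict, List, Tuple, Optional, Any
--
-- SEMANTIC_TERMINATION_ALIASES: Dict[str, Tuple[str, ...]] = {
--     "inflow": ("inflow", "aorta_inflow"),
--     "ext_iliac_right": ("ext_iliac_right", "external_iliac_right", "right_external_iliac"),
--     "ext_iliac_left": ("ext_iliac_left", "external_iliac_left", "left_external_iliac"),
--     "int_iliac_right": ("int_iliac_right", "internal_iliac_right", "right_internal_iliac"),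
--     "int_iliac_left": ("int_iliac_left", "internal_iliac_left", "left_internal_iliac"),
--     "renal_right": ("renal_right", "right_renal"),
--     "renal_left": ("renal_left", "left_renal"),
--     "sma": ("sma",),
--     "ima": ("ima",),
--     "celiac_hepatic": ("celiac_hepatic", "celiac"),
--     "celiac_splenic": ("celiac_splenic", "celiac"),
-- }
--
-- def normalize_semantic_label(label: Any) -> str:
--     text = str(label).strip().lower()
--     return text.replace("-", "_").replace(" ", "_")
--
-- def canonical_semantic_label(label: Any) -> str:
--     norm = normalize_semantic_label(label)
--     for canonical, aliases in SEMANTIC_TERMINATION_ALIASES.items():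
--         if norm == canonical:
--             return canonical
--         if norm in aliases:
--             return canonical
--     return norm
-- ===== SOURCE B (Python) =====
-- # Flat literal reverse map: alias -> canonical. Written out by hand, first-wins
-- # for the duplicated "celiac" (it maps to celiac_hepatic, the first table entry).
-- CANONICAL_BY_NAME = {
--     "inflow": "inflow",
--     "aorta_inflow": "inflow",
--     "ext_iliac_right": "ext_iliac_right",
--     "external_iliac_right": "ext_iliac_right",
--     "right_external_iliac": "ext_iliac_right",
--     "ext_iliac_left": "ext_iliac_left",
--     "external_iliac_left": "ext_iliac_left",
--     "left_external_iliac": "ext_iliac_left",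
--     "int_iliac_right": "int_iliac_right",
--     "internal_iliac_right": "int_iliac_right",
--     "right_internal_iliac": "int_iliac_right",
--     "int_iliac_left": "int_iliac_left",
--     "internal_iliac_left": "int_iliac_left",
--     "left_internal_iliac": "int_iliac_left",
--     "renal_right": "renal_right",
--     "right_renal": "renal_right",
--     "renal_left": "renal_left",
--     "left_renal": "renal_left",
--     "sma": "sma",
--     "ima": "ima",
--     "celiac_hepatic": "celiac_hepatic",
--     "celiac": "celiac_hepatic",
--     "celiac_splenic": "celiac_splenic",
-- }
--
-- def canonical_semantic_label(label) -> str: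
--     norm = str(label).strip().lower().replace("-", "_").replace(" ", "_")
--     return CANONICAL_BY_NAME.get(norm, norm)
-- ===== Notes on version B (the rewrite author's own statement) =====
-- stated objective: idiomatic
-- what changed: B drops the nested alias table entirely and uses a hand-written flat literal dict alias->canonical (duplicated 'celiac' written once, mapping to celiac_hepatic, the first table entry in A), so each call is a single dict lookup instead of A's scan over the table with per-entry membership tests.
import Mathlib
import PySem

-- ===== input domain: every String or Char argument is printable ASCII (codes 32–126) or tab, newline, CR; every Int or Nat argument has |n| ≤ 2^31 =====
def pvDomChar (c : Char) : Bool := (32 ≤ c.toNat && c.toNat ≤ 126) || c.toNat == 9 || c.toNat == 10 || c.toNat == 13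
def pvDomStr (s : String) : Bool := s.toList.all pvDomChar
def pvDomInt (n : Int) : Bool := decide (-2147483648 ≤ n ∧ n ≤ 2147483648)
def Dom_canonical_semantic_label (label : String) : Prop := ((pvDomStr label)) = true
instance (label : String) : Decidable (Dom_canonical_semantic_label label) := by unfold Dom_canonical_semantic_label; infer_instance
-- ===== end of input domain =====

-- B replaces A's per-call scan over the nested alias table by a hand-written flat
-- literal dict (alias -> canonical) and a single lookup per call.

-- Shared helper (identical in both Python files):
def normalize_semantic_label (label : String) : String :=
  PySem.Str.replace (PySem.Str.replace (PySem.Str.lower (PySem.Str.strip label)) "-" "_") " " "_"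

-- ===== PORT A =====
def SEMANTIC_TERMINATION_ALIASES : List (String × List String) :=
  [("inflow", ["inflow", "aorta_inflow"]),
   ("ext_iliac_right", ["ext_iliac_right", "external_iliac_right", "right_external_iliac"]),
   ("ext_iliac_left", ["ext_iliac_left", "external_iliac_left", "left_external_iliac"]),
   ("int_iliac_right", ["int_iliac_right", "internal_iliac_right", "right_internal_iliac"]),
   ("int_iliac_left", ["int_iliac_left", "internal_iliac_left", "left_internal_iliac"]),
   ("renal_right", ["renal_right", "right_renal"]),
   ("renal_left", ["renal_left", "left_renal"]),
   ("sma", ["sma"]),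
   ("ima", ["ima"]),
   ("celiac_hepatic", ["celiac_hepatic", "celiac"]),
   ("celiac_splenic", ["celiac_splenic", "celiac"])]

-- A's for-loop over the alias table, returning at the first match.
def pvScanA (norm : String) : List (String × List String) → String
  | [] => norm
  | (canonical, aliases) :: rest =>
      if norm == canonical then canonical
      else if aliases.contains norm then canonical
      else pvScanA norm rest

def canonical_semantic_label (label : String) : String :=
  pvScanA (normalize_semantic_label label) SEMANTIC_TERMINATION_ALIASES

-- ===== PORT B =====
-- Source B's hand-written flat literal dict CANONICAL_BY_NAME (alias -> canonical).
def CANONICAL_BY_NAME : PySem.Dict String String :=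
  PySem.Dict.mk
    [("inflow", "inflow"), ("aorta_inflow", "inflow"),
     ("ext_iliac_right", "ext_iliac_right"), ("external_iliac_right", "ext_iliac_right"),
     ("right_external_iliac", "ext_iliac_right"),
     ("ext_iliac_left", "ext_iliac_left"), ("external_iliac_left", "ext_iliac_left"),
     ("left_external_iliac", "ext_iliac_left"),
     ("int_iliac_right", "int_iliac_right"), ("internal_iliac_right", "int_iliac_right"),
     ("right_internal_iliac", "int_iliac_right"),
     ("int_iliac_left", "int_iliac_left"), ("internal_iliac_left", "int_iliac_left"),
     ("left_internal_iliac", "int_iliac_left"),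
     ("renal_right", "renal_right"), ("right_renal", "renal_right"),
     ("renal_left", "renal_left"), ("left_renal", "renal_left"),
     ("sma", "sma"), ("ima", "ima"),
     ("celiac_hepatic", "celiac_hepatic"), ("celiac", "celiac_hepatic"),
     ("celiac_splenic", "celiac_splenic")]

def canonical_semantic_label_alt (label : String) : String :=
  let norm := PySem.Str.replace (PySem.Str.replace (PySem.Str.lower (PySem.Str.strip label)) "-" "_") " " "_"
  (CANONICAL_BY_NAME.get? norm).getD norm

-- ===== PRECONDITION & SPEC =====
def Spec_canonical_semantic_label (label : String) (out : String) : Prop := out = canonical_semantic_label_alt label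
instance (label : String) (out : String) : Decidable (Spec_canonical_semantic_label label out) := by unfold Spec_canonical_semantic_label; infer_instance

-- ===== CLAIM (what is proved, stated in full; the proofs are below) =====
def Claim_equal_canonical_semantic_label : Prop := ∀ (label : String), Dom_canonical_semantic_label label → Spec_canonical_semantic_label label (canonical_semantic_label label)

-- ===== LEMMAS AND PROOFS =====

-- All names occurring anywhere in the table (canonicals and aliases).
def pvAllNames : List String :=
  ["inflow", "aorta_inflow",
   "ext_iliac_right", "external_iliac_right", "right_external_iliac",
   "ext_iliac_left", "external_iliac_left", "left_external_iliac",
   "int_iliac_right", "internal_iliac_right", "right_internal_iliac",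
   "int_iliac_left", "internal_iliac_left", "left_internal_iliac",
   "renal_right", "right_renal", "renal_left", "left_renal",
   "sma", "ima", "celiac_hepatic", "celiac", "celiac_splenic"]

lemma pvScanA_not_mem (s : String) (t : List (String × List String))
    (h : ∀ p ∈ t, s ≠ p.1 ∧ s ∉ p.2) : pvScanA s t = s := by
  induction t with
  | nil => rfl
  | cons p rest ih =>
      obtain ⟨h1, h2⟩ := h p (List.mem_cons_self ..)
      cases p with
      | mk c al =>
        simp only [pvScanA]
        rw [if_neg (by simp only [beq_iff_eq]; exact h1),
            if_neg (by simp only [List.contains_eq_mem, decide_eq_true_eq]; exact h2)]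
        exact ih fun q hq => h q (List.mem_cons_of_mem _ hq)

lemma pvGet?_mk_none (s : String) (l : List (String × String))
    (h : ∀ p ∈ l, s ≠ p.1) : (PySem.Dict.mk l).get? s = none := by
  induction l with
  | nil => rfl
  | cons p rest ih =>
      rw [PySem.Dict.get?_mk_cons,
          if_neg (by simp only [beq_iff_eq]; exact fun e => h p (List.mem_cons_self ..) e.symm)]
      exact ih fun q hq => h q (List.mem_cons_of_mem _ hq)

set_option maxRecDepth 4096 in
lemma pvB_keys_sub :
    ∀ p ∈ [("inflow", "inflow"), ("aorta_inflow", "inflow"),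
     ("ext_iliac_right", "ext_iliac_right"), ("external_iliac_right", "ext_iliac_right"),
     ("right_external_iliac", "ext_iliac_right"),
     ("ext_iliac_left", "ext_iliac_left"), ("external_iliac_left", "ext_iliac_left"),
     ("left_external_iliac", "ext_iliac_left"),
     ("int_iliac_right", "int_iliac_right"), ("internal_iliac_right", "int_iliac_right"),
     ("right_internal_iliac", "int_iliac_right"),
     ("int_iliac_left", "int_iliac_left"), ("internal_iliac_left", "int_iliac_left"),
     ("left_internal_iliac", "int_iliac_left"),
     ("renal_right", "renal_right"), ("right_renal", "renal_right"),
     ("renal_left", "renal_left"), ("left_renal", "renal_left"),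
     ("sma", "sma"), ("ima", "ima"),
     ("celiac_hepatic", "celiac_hepatic"), ("celiac", "celiac_hepatic"),
     ("celiac_splenic", "celiac_splenic")], (p : String × String).1 ∈ pvAllNames := by decide

set_option maxRecDepth 4096 in
lemma pvTable_names_sub :
    ∀ p ∈ SEMANTIC_TERMINATION_ALIASES, p.1 ∈ pvAllNames ∧ ∀ a ∈ p.2, a ∈ pvAllNames := by decide

set_option maxRecDepth 8192 in
lemma pvScan_eq_lookup (s : String) :
    pvScanA s SEMANTIC_TERMINATION_ALIASES = (CANONICAL_BY_NAME.get? s).getD s := by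
  by_cases h : s ∈ pvAllNames
  · fin_cases h <;> rfl
  · rw [CANONICAL_BY_NAME,
        pvGet?_mk_none s _ (fun p hp => fun e => h (e ▸ pvB_keys_sub p hp)),
        Option.getD_none,
        pvScanA_not_mem s _ (fun p hp =>
          ⟨fun e => h (e ▸ (pvTable_names_sub p hp).1),
           fun e => h ((pvTable_names_sub p hp).2 s e)⟩)]

-- ===== VERDICT (by name: the statement is the Claim_ definition above) =====
theorem canonical_semantic_label_spec : Claim_equal_canonical_semantic_label := by
  intro label _
  unfold Spec_canonical_semantic_label canonical_semantic_label canonical_semantic_label_alt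
  exact pvScan_eq_lookup _
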